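-- pv_equiv track=rewrite | github.com/demonhomefries/ImageJ-Lysosome-Transport-Density | lysosome_density_csv_merge_script.py | extract_well_id
-- ===== SOURCE A (Python) =====
-- def extract_well_id(tag: str):
--     """
--     Return the first 96‑ or 384‑well ID found in an underscore‑delimited string.
--     Works even when the token is immediately followed by extra text (e.g. '.tif').
--     """
--     if not isinstance(tag, str):
--         return None
--
--     def is_well_token(tok: str):
--         if len(tok) < 2:
--             return False, None
--
--         row = tok[0].upper()
--         # grab the consecutive digits right after the row letter
--         digits = ''
--         for ch in tok[1:]:
--             if ch.isdigit():
--                 digits += ch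
--             else:
--                 break  # stop at the first non‑digit ('.', '_', etc.)
--
--         if not digits:
--             return False, None
--
--         col = int(digits.lstrip('0') or '0')  # allow leading zeros
--
--         # 96‑well limits
--         if "A" <= row <= "H" and 1 <= col <= 12:
--             return True, f"{row}{col}"
--         # 384‑well limits
--         if "A" <= row <= "P" and 1 <= col <= 24:
--             return True, f"{row}{col}"
--
--         return False, None
--
--     for chunk in tag.split("_"):
--         ok, well = is_well_token(chunk)
--         if ok:
--             return well
--     return None
-- ===== SOURCE B (Python) =====
-- def extract_well_id(tag):
--     """Single left-to-right scan: try a well match at every chunk start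
--     (position 0 or right after '_') instead of splitting into tokens."""
--     if not isinstance(tag, str):
--         return None
--     n = len(tag)
--     boundary = True
--     for i in range(n):
--         c = tag[i]
--         if boundary and ('A' <= c <= 'P' or 'a' <= c <= 'p'):
--             j = i + 1
--             while j < n and '0' <= tag[j] <= '9':
--                 j += 1
--             if j > i + 1:
--                 col = int(tag[i + 1:j])
--                 if 1 <= col <= 24:
--                     return c.upper() + str(col)
--         boundary = (c == '_')
--     return None
-- ===== Notes on version B (the rewrite author's own statement) =====
-- stated objective: simpler
-- what changed: Replaced split-into-underscore-tokens plus a nested per-token checker (with two redundant range tests and a leading-zero-stripping integer parse) by a single left-to-right scan that tries a well match only at chunk starts, with one collapsed range test 1<=col<=24 and a direct integer parse of the digit run.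
import Mathlib
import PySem

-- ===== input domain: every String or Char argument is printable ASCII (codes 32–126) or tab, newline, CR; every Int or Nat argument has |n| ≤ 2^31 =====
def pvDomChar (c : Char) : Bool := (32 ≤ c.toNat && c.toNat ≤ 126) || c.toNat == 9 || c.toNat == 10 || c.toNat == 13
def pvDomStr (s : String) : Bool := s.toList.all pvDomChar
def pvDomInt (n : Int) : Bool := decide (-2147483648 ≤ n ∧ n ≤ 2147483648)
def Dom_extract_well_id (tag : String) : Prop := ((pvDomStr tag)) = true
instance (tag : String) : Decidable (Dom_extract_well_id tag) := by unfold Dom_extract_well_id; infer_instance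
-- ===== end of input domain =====

-- B replaces A's split-into-tokens + per-token check by one left-to-right scan that
-- tries a match only at chunk starts (objective: simpler, one pass, no token list).

-- ===== PORT A =====
-- tag.split("_"): hand-ported single-char-separator str.split (keeps empty pieces;
-- "".split("_") == [""]); exact for the one-character separator '_'.
def pySplitUnderscore : List Char → List (List Char)
  | [] => [[]]
  | c :: cs =>
    if c = '_' then [] :: pySplitUnderscore cs
    else
      match pySplitUnderscore cs with
      | t :: ts => (c :: t) :: ts
      | [] => [[c]]   -- unreachable: pySplitUnderscore never returns []

-- the `for ch in tok[1:]` loop of is_well_token: collect digits, break at first non-digit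
def collectDigits : List Char → List Char
  | [] => []
  | ch :: rest => if PySem.Chars.isdigit ch then ch :: collectDigits rest else []

-- int(s) for a (nonempty) all-digit string s; exact there (no sign/whitespace present)
def pyIntOfDigits (cs : List Char) : Int :=
  cs.foldl (fun acc c => acc * 10 + ((c.toNat : Int) - 48)) 0

def isWellToken (tok : List Char) : Bool × Option String :=
  match tok with
  | [] => (false, none)          -- len(tok) < 2
  | [_] => (false, none)         -- len(tok) < 2
  | c :: rest =>
    let row := PySem.Chars.upperChar c
    let digits := collectDigits rest
    if digits = [] then (false, none)
    else
      -- int(digits.lstrip('0') or '0')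
      let stripped := digits.dropWhile (fun x => x = '0')
      let col := pyIntOfDigits (if stripped = [] then ['0'] else stripped)
      if ('A' ≤ row ∧ row ≤ 'H') ∧ (1 ≤ col ∧ col ≤ 12) then
        (true, some (String.ofList (row :: PySem.Int.toChars col)))
      else if ('A' ≤ row ∧ row ≤ 'P') ∧ (1 ≤ col ∧ col ≤ 24) then
        (true, some (String.ofList (row :: PySem.Int.toChars col)))
      else (false, none)

-- the `for chunk in tag.split("_")` loop
def loopChunks : List (List Char) → Option String
  | [] => none
  | tok :: toks =>
    let r := isWellToken tok
    if r.1 then r.2 else loopChunks toks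

def extract_well_id (tag : String) : Option String :=
  loopChunks (pySplitUnderscore tag.toList)

-- ===== PORT B =====
-- the inner `while j < n and '0' <= tag[j] <= '9'` run of digits starting at a position
def digitRun : List Char → List Char
  | [] => []
  | c :: cs => if '0' ≤ c ∧ c ≤ '9' then c :: digitRun cs else []

-- the `for i in range(n)` scan carrying the `boundary` flag
def scanWell : Bool → List Char → Option String
  | _, [] => none
  | boundary, c :: rest =>
    if boundary ∧ (('A' ≤ c ∧ c ≤ 'P') ∨ ('a' ≤ c ∧ c ≤ 'p')) then
      let ds := digitRun rest
      if ds ≠ [] then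
        let col := pyIntOfDigits ds   -- int(tag[i+1:j]) on an all-digit slice
        if 1 ≤ col ∧ col ≤ 24 then
          some (String.ofList (PySem.Chars.upperChar c :: PySem.Int.toChars col))
        else scanWell (c = '_') rest
      else scanWell (c = '_') rest
    else scanWell (c = '_') rest

def extract_well_id_alt (tag : String) : Option String :=
  scanWell true tag.toList

-- ===== PRECONDITION & SPEC =====
def Spec_extract_well_id (tag : String) (out : Option String) : Prop := out = extract_well_id_alt tag
instance (tag : String) (out : Option String) : Decidable (Spec_extract_well_id tag out) := by unfold Spec_extract_well_id; infer_instance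

-- ===== CLAIM (what is proved, stated in full; the proofs are below) =====
def Claim_equal_extract_well_id : Prop := ∀ (tag : String), Dom_extract_well_id tag → Spec_extract_well_id tag (extract_well_id tag)

-- ===== LEMMAS AND PROOFS =====

theorem collectDigits_eq_digitRun (cs : List Char) : collectDigits cs = digitRun cs := by
  induction cs with
  | nil => rfl
  | cons c cs ih =>
    simp [collectDigits, digitRun, PySem.Chars.isdigit, ih]

theorem pySplitUnderscore_ne_nil (cs : List Char) : pySplitUnderscore cs ≠ [] := by
  induction cs with
  | nil => simp [pySplitUnderscore]
  | cons c cs ih =>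
    by_cases h : c = '_' <;> simp [pySplitUnderscore, h]
    cases hs : pySplitUnderscore cs with
    | nil => exact absurd hs ih
    | cons t ts => simp

-- digits collected from the rest of the string = digits collected from the current chunk
theorem digitRun_head_chunk (cs t : List Char) (ts : List (List Char))
    (h : pySplitUnderscore cs = t :: ts) : digitRun cs = digitRun t := by
  induction cs generalizing t ts with
  | nil =>
    unfold pySplitUnderscore at h
    injection h with h1 h2
    rw [← h1]
  | cons c cs ih =>
    by_cases hc : c = '_'
    · subst hc
      have h' : ([] : List Char) :: pySplitUnderscore cs = t :: ts := by
        rw [← h]; rfl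
      injection h' with h1 h2
      rw [← h1]
      simp [digitRun]
    · cases hs : pySplitUnderscore cs with
      | nil => exact absurd hs (pySplitUnderscore_ne_nil cs)
      | cons t' ts' =>
        have h' : (c :: t') :: ts' = t :: ts := by
          rw [← h]
          simp [pySplitUnderscore, hc, hs]
        injection h' with h1 h2
        rw [← h1]
        by_cases hd : ('0' ≤ c ∧ c ≤ '9')
        · simp [digitRun, hd, ih t' ts' hs]
        · simp [digitRun, hd]

-- stripping leading zeros does not change the value
theorem pyIntOfDigits_dropZeros (ds : List Char) :
    pyIntOfDigits (ds.dropWhile (fun x => x = '0')) = pyIntOfDigits ds := by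
  induction ds with
  | nil => rfl
  | cons c cs ih =>
    by_cases h : c = '0'
    · subst h
      simpa [List.dropWhile, pyIntOfDigits] using ih
    · simp [List.dropWhile, h]

theorem pyIntOfDigits_strip (ds : List Char) :
    pyIntOfDigits (if ds.dropWhile (fun x => x = '0') = [] then ['0'] else ds.dropWhile (fun x => x = '0')) = pyIntOfDigits ds := by
  by_cases h : ds.dropWhile (fun x => x = '0') = []
  · rw [if_pos h]
    have h0 : pyIntOfDigits ['0'] = pyIntOfDigits ([] : List Char) := by decide
    rw [h0, ← h, pyIntOfDigits_dropZeros]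
  · simp [h, pyIntOfDigits_dropZeros]

theorem charLe (a b : Char) : a ≤ b ↔ a.toNat ≤ b.toNat := by
  constructor <;> intro h <;> exact h

theorem upperChar_row_iff (c : Char) :
    ('A' ≤ PySem.Chars.upperChar c ∧ PySem.Chars.upperChar c ≤ 'P') ↔
      (('A' ≤ c ∧ c ≤ 'P') ∨ ('a' ≤ c ∧ c ≤ 'p')) := by
  by_cases h : ('a' ≤ c ∧ c ≤ 'z')
  · have h1 : 97 ≤ c.toNat := (charLe _ _).1 h.1
    have h2 : c.toNat ≤ 122 := (charLe _ _).1 h.2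
    have hu : PySem.Chars.upperChar c = Char.ofNat (c.toNat - 32) := by
      simp [PySem.Chars.upperChar, PySem.Chars.islower, h.1, h.2]
    have hv : Nat.isValidChar (c.toNat - 32) := Or.inl (by omega)
    have hval : (Char.ofNat (c.toNat - 32)).toNat = c.toNat - 32 := by
      rw [Char.toNat_ofNat]
      simp [hv]
    simp only [hu, charLe, hval]
    rw [show 'A'.toNat = 65 from rfl, show 'P'.toNat = 80 from rfl,
      show 'a'.toNat = 97 from rfl, show 'p'.toNat = 112 from rfl]
    omega
  · have hu : PySem.Chars.upperChar c = c := by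
      by_cases ha : 'a' ≤ c
      · have hb : ¬ c ≤ 'z' := fun hz => h ⟨ha, hz⟩
        simp [PySem.Chars.upperChar, PySem.Chars.islower, hb]
      · simp [PySem.Chars.upperChar, PySem.Chars.islower, ha]
    have hne : ¬ (97 ≤ c.toNat ∧ c.toNat ≤ 122) := by
      intro hh; exact h ⟨(charLe _ _).2 hh.1, (charLe _ _).2 hh.2⟩
    simp only [hu, charLe]
    rw [show 'A'.toNat = 65 from rfl, show 'P'.toNat = 80 from rfl,
      show 'a'.toNat = 97 from rfl, show 'p'.toNat = 112 from rfl]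
    omega

-- the two success conditions of A collapse to B's single one
theorem conditions_iff (c : Char) (col : Int) :
    ((('A' ≤ PySem.Chars.upperChar c ∧ PySem.Chars.upperChar c ≤ 'H') ∧ (1 ≤ col ∧ col ≤ 12)) ∨
     (('A' ≤ PySem.Chars.upperChar c ∧ PySem.Chars.upperChar c ≤ 'P') ∧ (1 ≤ col ∧ col ≤ 24))) ↔
      ((('A' ≤ c ∧ c ≤ 'P') ∨ ('a' ≤ c ∧ c ≤ 'p')) ∧ (1 ≤ col ∧ col ≤ 24)) := by
  rw [← upperChar_row_iff]
  constructor
  · rintro (⟨⟨h1, h2⟩, h3, h4⟩ | ⟨h1, h2⟩)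
    · refine ⟨⟨h1, le_trans h2 (by decide)⟩, h3, by omega⟩
    · exact ⟨h1, h2⟩
  · rintro ⟨h1, h2⟩
    right; exact ⟨h1, h2⟩

-- one step of B's scan at a character
theorem scanWell_step (b : Bool) (c : Char) (cs : List Char) :
    scanWell b (c :: cs) =
      if b ∧ ((('A' ≤ c ∧ c ≤ 'P') ∨ ('a' ≤ c ∧ c ≤ 'p')) ∧ digitRun cs ≠ [] ∧
          1 ≤ pyIntOfDigits (digitRun cs) ∧ pyIntOfDigits (digitRun cs) ≤ 24)
      then some (String.ofList (PySem.Chars.upperChar c :: PySem.Int.toChars (pyIntOfDigits (digitRun cs))))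
      else scanWell (c = '_') cs := by
  by_cases hb : b = true
  · subst hb
    by_cases hL : (('A' ≤ c ∧ c ≤ 'P') ∨ ('a' ≤ c ∧ c ≤ 'p'))
    · by_cases hds : digitRun cs = []
      · simp [scanWell, hL, hds]
      · by_cases hok : 1 ≤ pyIntOfDigits (digitRun cs) ∧ pyIntOfDigits (digitRun cs) ≤ 24
        · simp [scanWell, hL, hds, hok]
        · simp [scanWell, hL, hds, hok]
    · simp [scanWell, hL]
  · have hb' : b = false := by revert hb; cases b <;> simp
    subst hb'
    simp [scanWell]

-- A's token check on a token of length ≥ 2, with its two range tests collapsed into B's one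
theorem isWellToken_cons (c d : Char) (t' : List Char) :
    isWellToken (c :: d :: t') =
      if (('A' ≤ c ∧ c ≤ 'P') ∨ ('a' ≤ c ∧ c ≤ 'p')) ∧ collectDigits (d :: t') ≠ [] ∧
          1 ≤ pyIntOfDigits (collectDigits (d :: t')) ∧ pyIntOfDigits (collectDigits (d :: t')) ≤ 24
      then (true, some (String.ofList (PySem.Chars.upperChar c :: PySem.Int.toChars (pyIntOfDigits (collectDigits (d :: t'))))))
      else (false, none) := by
  by_cases hds : collectDigits (d :: t') = []
  · simp [isWellToken, hds]
  · simp only [isWellToken]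
    rw [if_neg hds, pyIntOfDigits_strip (collectDigits (d :: t'))]
    by_cases hC1 : ('A' ≤ PySem.Chars.upperChar c ∧ PySem.Chars.upperChar c ≤ 'H') ∧
        (1 ≤ pyIntOfDigits (collectDigits (d :: t')) ∧ pyIntOfDigits (collectDigits (d :: t')) ≤ 12)
    · rw [if_pos hC1]
      have hD := (conditions_iff c _).1 (Or.inl hC1)
      rw [if_pos ⟨hD.1, hds, hD.2⟩]
    · rw [if_neg hC1]
      by_cases hC2 : ('A' ≤ PySem.Chars.upperChar c ∧ PySem.Chars.upperChar c ≤ 'P') ∧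
          (1 ≤ pyIntOfDigits (collectDigits (d :: t')) ∧ pyIntOfDigits (collectDigits (d :: t')) ≤ 24)
      · rw [if_pos hC2]
        have hD := (conditions_iff c _).1 (Or.inr hC2)
        rw [if_pos ⟨hD.1, hds, hD.2⟩]
      · rw [if_neg hC2]
        have hD : ¬ ((('A' ≤ c ∧ c ≤ 'P') ∨ ('a' ≤ c ∧ c ≤ 'p')) ∧ collectDigits (d :: t') ≠ [] ∧
            1 ≤ pyIntOfDigits (collectDigits (d :: t')) ∧ pyIntOfDigits (collectDigits (d :: t')) ≤ 24) := by
          intro hh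
          exact ((conditions_iff c _).2 ⟨hh.1, hh.2.2⟩).elim (fun h => hC1 h) (fun h => hC2 h)
        rw [if_neg hD]

-- the main invariant: scanning with boundary = true is A's loop over all chunks,
-- scanning with boundary = false is A's loop over the chunks after the current one
theorem scan_eq_loop (cs : List Char) :
    scanWell true cs = loopChunks (pySplitUnderscore cs) ∧
    scanWell false cs = loopChunks ((pySplitUnderscore cs).tail) := by
  induction cs with
  | nil => exact ⟨rfl, rfl⟩
  | cons c cs ih =>
    by_cases hc : c = '_'
    · subst hc
      have hstep : ∀ b : Bool, scanWell b ('_' :: cs) = scanWell true cs := by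
        intro b
        rw [scanWell_step]
        have hL : ¬ (('A' ≤ '_' ∧ '_' ≤ 'P') ∨ ('a' ≤ '_' ∧ '_' ≤ 'p')) := by decide
        simp only [hL, and_false, false_and, if_false]
        simp
      have hsplit : pySplitUnderscore ('_' :: cs) = [] :: pySplitUnderscore cs := by
        simp [pySplitUnderscore]
      constructor
      · rw [hstep, ih.1, hsplit]
        simp [loopChunks, isWellToken]
      · rw [hstep, ih.1, hsplit]
        rfl
    · obtain ⟨t, ts, hs⟩ : ∃ t ts, pySplitUnderscore cs = t :: ts := by
        cases h : pySplitUnderscore cs with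
        | nil => exact absurd h (pySplitUnderscore_ne_nil cs)
        | cons t ts => exact ⟨t, ts, rfl⟩
      have hsplit : pySplitUnderscore (c :: cs) = (c :: t) :: ts := by
        simp [pySplitUnderscore, hc, hs]
      have hfalse : scanWell false (c :: cs) = scanWell false cs := by
        rw [scanWell_step]
        simp [hc]
      refine ⟨?_, by rw [hfalse, ih.2, hs, hsplit]; rfl⟩
      rw [hsplit]
      cases t with
      | nil =>
        -- chunk of length 1: A fails the length test, B finds no digit after the letter
        have hds : digitRun cs = [] := digitRun_head_chunk cs [] ts hs
        have h1 : scanWell true (c :: cs) = scanWell false cs := by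
          rw [scanWell_step]
          simp [hds, hc]
        rw [h1, ih.2, hs]
        simp [loopChunks, isWellToken]
      | cons d t' =>
        have hdr : digitRun cs = collectDigits (d :: t') :=
          (digitRun_head_chunk cs (d :: t') ts hs).trans (collectDigits_eq_digitRun (d :: t')).symm
        rw [scanWell_step, hdr]
        simp only [loopChunks]
        rw [isWellToken_cons]
        by_cases hC : (('A' ≤ c ∧ c ≤ 'P') ∨ ('a' ≤ c ∧ c ≤ 'p')) ∧ collectDigits (d :: t') ≠ [] ∧
            1 ≤ pyIntOfDigits (collectDigits (d :: t')) ∧ pyIntOfDigits (collectDigits (d :: t')) ≤ 24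
        · simp [hC]
        · simp only [hC, and_false, if_false]
          have : scanWell (decide (c = '_')) cs = scanWell false cs := by
            simp [hc]
          rw [this, ih.2, hs]
          rfl

-- ===== VERDICT (by name: the statement is the Claim_ definition above) =====
theorem extract_well_id_spec : Claim_equal_extract_well_id := by
  intro tag _
  show extract_well_id tag = extract_well_id_alt tag
  unfold extract_well_id extract_well_id_alt
  exact ((scan_eq_loop tag.toList).1).symm
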